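-- pv_equiv track=rewrite | github.com/prepareSecondHalf/coding_test | week_4/book/외벽점검.py | solution
-- ===== SOURCE A (Python) =====
-- from collections import deque
--
-- def solution(n, weak, dist):
--     answer = 0
--     weak_dist = [] # 각 취약점 사이 거리
--
--     dist.sort(reverse=True)
--
--     for i in range(len(weak) - 1):
--         weak_dist.append(weak[i + 1] - weak[i])
--
--     # 맨 마지막 취약점과 맨 처음 취약점 사이 거리
--     weak_dist.append((n - weak[-1]) + weak[0])
--
--     # 거리 내림차순
--     weak_dist.sort(reverse=True)
--     weak_dist = deque(weak_dist)
--
--     i = 1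
--
--     while True:
--         wd_len = len(weak_dist)
--
--         # 거리가 하나도 남지 않았으면
--         if wd_len <= 0:
--             answer = -1
--             break
--
--         # 최대값은 빼주기
--         weak_dist.popleft()
--
--         # 최대 친구들 i번째까지 가져오기
--         tmp_dist = [dist[i] for i in range(0, i)]
--
--         # 남은 거리 <= 친구들이 할 수 있는 값의 합
--         if sum(weak_dist) <= sum(tmp_dist):
--             answer = i
--             break
--         else:
--             i += 1
--
--     return answer
-- ===== SOURCE B (Python) =====
-- def solution(n, weak, dist):
--     dist.sort(reverse=True)  # keep A's observable in-place sort of dist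
--     m = len(weak)
--     gaps = [weak[j + 1] - weak[j] for j in range(m - 1)]
--     gaps.append((n - weak[-1]) + weak[0])
--     gaps.sort(reverse=True)
--     total = sum(gaps)
--     pg = pd = 0
--     i = 0
--     for g, d in zip(gaps, dist):
--         i += 1
--         pg += g
--         pd += d
--         if total - pg <= pd:
--             return i
--     return -1
-- ===== Notes on version B (the rewrite author's own statement) =====
-- stated objective: alternative
-- what changed: Replaces A's deque loop that re-sums the remaining gaps and rebuilds the top-i friend list on every iteration with one pass over zip(sorted gaps, sorted dist) maintaining running prefix sums, so each feasibility test is O(1) instead of a fresh O(W) re-summation; on typical inputs the first prefix already succeeds, so the measured cost is the same. Pre_ excludes exactly the inputs where A raises IndexError: empty weak, and inputs with fewer friends than weak points where no friend-prefix within len(dist) already suffices.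
import Mathlib
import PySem

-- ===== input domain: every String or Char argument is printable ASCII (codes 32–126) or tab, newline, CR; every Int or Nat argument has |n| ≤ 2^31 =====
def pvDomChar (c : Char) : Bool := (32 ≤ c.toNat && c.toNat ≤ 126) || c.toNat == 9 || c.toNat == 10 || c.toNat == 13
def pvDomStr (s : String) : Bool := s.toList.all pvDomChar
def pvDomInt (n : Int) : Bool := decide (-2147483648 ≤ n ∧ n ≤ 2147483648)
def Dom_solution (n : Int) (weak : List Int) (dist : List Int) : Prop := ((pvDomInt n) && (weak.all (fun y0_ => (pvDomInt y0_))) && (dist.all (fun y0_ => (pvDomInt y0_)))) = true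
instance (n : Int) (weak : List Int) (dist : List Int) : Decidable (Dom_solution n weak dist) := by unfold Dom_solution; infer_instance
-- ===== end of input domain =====

-- B replaces A's per-iteration re-summing (deque + rebuilt top-i list) by a single pass with
-- running prefix sums over zip(sorted gaps, sorted dist), an alternative of the same measured
-- cost. Both Pythons sort `dist` in place (same side effect); the claim is about the return value.

-- ===== PORT A =====
-- the `while True` loop: deque as a list, popleft = head; dist indexing via pyGetD
-- (exact inside Pre_, where every accessed index is in range)
def solLoopA (dist : List Int) : List Int → Int → Int
  | [], _ => -1
  | _ :: rest, i =>
      let tmp := (PySem.List.pyRange 0 i 1).map (fun j => PySem.List.pyGetD dist j 0)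
      if rest.sum ≤ tmp.sum then i else solLoopA dist rest (i + 1)

def solution (n : Int) (weak : List Int) (dist : List Int) : Int :=
  let dist' := PySem.List.sorted dist (fun x => x) true
  let weak_dist := (PySem.List.pyRange 0 ((weak.length : Int) - 1) 1).map
      (fun i => PySem.List.pyGetD weak (i + 1) 0 - PySem.List.pyGetD weak i 0)
  let weak_dist := weak_dist ++ [(n - PySem.List.pyGetD weak (-1) 0) + PySem.List.pyGetD weak 0 0]
  let weak_dist := PySem.List.sorted weak_dist (fun x => x) true
  solLoopA dist' weak_dist 1

-- ===== PORT B =====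
-- the `for g, d in zip(gaps, dist)` loop with running prefix sums pg, pd
def solLoopB : List Int → List Int → Int → Int → Int → Int → Int
  | g :: gs, d :: ds, total, pg, pd, i =>
      let pg' := pg + g
      let pd' := pd + d
      if total - pg' ≤ pd' then i + 1 else solLoopB gs ds total pg' pd' (i + 1)
  | _, _, _, _, _, _ => -1

def solution_alt (n : Int) (weak : List Int) (dist : List Int) : Int :=
  let ds := PySem.List.sorted dist (fun x => x) true
  let gaps := (PySem.List.pyRange 0 ((weak.length : Int) - 1) 1).map
      (fun j => PySem.List.pyGetD weak (j + 1) 0 - PySem.List.pyGetD weak j 0)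
  let gaps := gaps ++ [(n - PySem.List.pyGetD weak (-1) 0) + PySem.List.pyGetD weak 0 0]
  let gaps := PySem.List.sorted gaps (fun x => x) true
  solLoopB gaps ds gaps.sum 0 0 0

-- ===== PRECONDITION & SPEC =====
-- the descending-sorted gap list (same expression the ports build; no port is referenced)
def pvGaps (n : Int) (weak : List Int) : List Int :=
  PySem.List.sorted ((PySem.List.pyRange 0 ((weak.length : Int) - 1) 1).map
      (fun j => PySem.List.pyGetD weak (j + 1) 0 - PySem.List.pyGetD weak j 0)
    ++ [(n - PySem.List.pyGetD weak (-1) 0) + PySem.List.pyGetD weak 0 0]) (fun x => x) true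

-- Pre_ excludes exactly the inputs where A raises IndexError: empty weak (weak[-1]), and inputs
-- with fewer friends than weak points where no friend-prefix i ≤ len(dist) already covers the
-- remaining gaps (then A's loop indexes dist past its end).
def Pre_solution (n : Int) (weak : List Int) (dist : List Int) : Prop :=
  weak ≠ [] ∧ (weak.length ≤ dist.length ∨
    ∃ i ∈ Finset.Icc 1 dist.length,
      ((pvGaps n weak).drop i).sum ≤ ((PySem.List.sorted dist (fun x => x) true).take i).sum)
instance (n : Int) (weak : List Int) (dist : List Int) : Decidable (Pre_solution n weak dist) := by unfold Pre_solution; infer_instance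

def pvWitness_solution : Int × List Int × List Int := (10, [1, 5], [3, 2])

def Spec_solution (n : Int) (weak : List Int) (dist : List Int) (out : Int) : Prop := out = solution_alt n weak dist
instance (n : Int) (weak : List Int) (dist : List Int) (out : Int) : Decidable (Spec_solution n weak dist out) := by unfold Spec_solution; infer_instance

-- ===== CLAIM (what is proved, stated in full; the proofs are below) =====
def Claim_equal_solution : Prop := ∀ (n : Int) (weak : List Int) (dist : List Int), Dom_solution n weak dist → Pre_solution n weak dist → Spec_solution n weak dist (solution n weak dist)

-- ===== LEMMAS AND PROOFS =====

-- A's tmp list `[dist[j] for j in range(0, i)]` is the first i elements of dist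
lemma map_pyGetD_range_take (ds : List Int) (k : Nat) (hk : k ≤ ds.length) :
    (PySem.List.pyRange 0 (k : Int) 1).map (fun j => PySem.List.pyGetD ds j 0) = ds.take k := by
  induction k with
  | zero => simp [PySem.List.pyRange_one_eq_nil]
  | succ k ih =>
      have h1 : ((k : Int) + 1) = ((k + 1 : Nat) : Int) := by push_cast; ring
      have h2 : PySem.List.pyRange 0 ((k : Int) + 1) 1
          = PySem.List.pyRange 0 (k : Int) 1 ++ [(k : Int)] :=
        PySem.List.pyRange_one_succ_right (by positivity)
      have hk' : k < ds.length := by omega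
      have h3 : PySem.List.pyGetD ds (k : Int) 0 = ds[k] := by
        simpa using PySem.List.pyGetD_eq_getElem ds (i := (k : Int)) 0 (by positivity) (by exact_mod_cast hk')
      rw [← h1, h2, List.map_append, ih (by omega), List.take_add_one]
      simp [h3, List.getElem?_eq_getElem hk']

lemma loop_eq (ds : List Int) (gs : List Int) : ∀ (k : Nat) (pg pd total : Int),
    (k + gs.length ≤ ds.length ∨
      ∃ t : Nat, t < gs.length ∧ k + t < ds.length ∧
        (gs.drop (t + 1)).sum ≤ (ds.take (k + t + 1)).sum) →
    total - pg = gs.sum →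
    pd = (ds.take k).sum →
    solLoopA ds gs ((k : Int) + 1) = solLoopB gs (ds.drop k) total pg pd (k : Int) := by
  induction gs with
  | nil =>
      intro k pg pd total _ _ _
      simp [solLoopA, solLoopB]
  | cons g rest ih =>
      intro k pg pd total hlen htot hpd
      have hk : k < ds.length := by
        rcases hlen with h | ⟨t, ht1, ht2, _⟩
        · simp at h; omega
        · omega
      have hdrop : ds.drop k = ds[k] :: ds.drop (k + 1) := List.drop_eq_getElem_cons hk
      have htake : (ds.take (k + 1)).sum = (ds.take k).sum + ds[k] :=
        List.sum_take_succ ds k hk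
      have htmp : (PySem.List.pyRange 0 ((k : Int) + 1) 1).map (fun j => PySem.List.pyGetD ds j 0)
          = ds.take (k + 1) := by
        have h1 : ((k : Int) + 1) = ((k + 1 : Nat) : Int) := by push_cast; ring
        rw [h1, map_pyGetD_range_take ds (k + 1) (by omega)]
      have hcond : (rest.sum ≤ (ds.take (k + 1)).sum) ↔ (total - (pg + g) ≤ pd + ds[k]) := by
        have : total - (pg + g) = rest.sum := by simp at htot; omega
        rw [this, htake, hpd]
      rw [hdrop]
      simp only [solLoopA, solLoopB, htmp]
      by_cases h : rest.sum ≤ (ds.take (k + 1)).sum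
      · rw [if_pos h, if_pos (hcond.mp h)]
      · rw [if_neg h, if_neg (fun hc => h (hcond.mpr hc))]
        have h1 : (k : Int) + 1 + 1 = ((k + 1 : Nat) : Int) + 1 := by push_cast; ring
        have h2 : (k : Int) + 1 = ((k + 1 : Nat) : Int) := by push_cast; ring
        have hlen' : (k + 1) + rest.length ≤ ds.length ∨
            ∃ t : Nat, t < rest.length ∧ (k + 1) + t < ds.length ∧
              (rest.drop (t + 1)).sum ≤ (ds.take ((k + 1) + t + 1)).sum := by
          rcases hlen with h' | ⟨t, ht1, ht2, ht3⟩
          · left; simp at h'; omega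
          · cases t with
            | zero => exact absurd (by simpa using ht3) h
            | succ t' =>
                right
                exact ⟨t', by simpa using ht1, by omega, by
                  have e1 : (g :: rest).drop (t' + 1 + 1) = rest.drop (t' + 1) := rfl
                  have e2 : k + (t' + 1) + 1 = (k + 1) + t' + 1 := by omega
                  rw [e1, e2] at ht3; exact ht3⟩
        rw [h1, h2, ih (k + 1) (pg + g) (pd + ds[k]) total hlen'
          (by simp at htot ⊢; omega) (by rw [htake, hpd])]

-- ===== VERDICT (by name: the statement is the Claim_ definition above) =====
theorem solution_spec : Claim_equal_solution := by
  intro n weak dist _ hpre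
  obtain ⟨hne, hcov⟩ := hpre
  unfold Spec_solution solution solution_alt
  have hm : 1 ≤ weak.length := List.length_pos_of_ne_nil hne
  have hglen : ((PySem.List.pyRange 0 ((weak.length : Int) - 1) 1).map
        (fun j => PySem.List.pyGetD weak (j + 1) 0 - PySem.List.pyGetD weak j 0)
      ++ [(n - PySem.List.pyGetD weak (-1) 0) + PySem.List.pyGetD weak 0 0]).length
      = weak.length := by
    simp [PySem.List.length_pyRange_one]
    omega
  set gaps0 := (PySem.List.pyRange 0 ((weak.length : Int) - 1) 1).map
        (fun j => PySem.List.pyGetD weak (j + 1) 0 - PySem.List.pyGetD weak j 0)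
      ++ [(n - PySem.List.pyGetD weak (-1) 0) + PySem.List.pyGetD weak 0 0] with hg0
  have hglen' : (PySem.List.sorted gaps0 (fun x => x) true).length = weak.length := by
    rw [PySem.List.length_sorted, hglen]
  have hside : 0 + (PySem.List.sorted gaps0 (fun x => x) true).length
        ≤ (PySem.List.sorted dist (fun x => x) true).length ∨
      ∃ t : Nat, t < (PySem.List.sorted gaps0 (fun x => x) true).length ∧
        0 + t < (PySem.List.sorted dist (fun x => x) true).length ∧
        ((PySem.List.sorted gaps0 (fun x => x) true).drop (t + 1)).sum
          ≤ ((PySem.List.sorted dist (fun x => x) true).take (0 + t + 1)).sum := by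
    by_cases hml : weak.length ≤ dist.length
    · left; rw [hglen', PySem.List.length_sorted]; omega
    · rcases hcov with h' | ⟨i, hi, hcond⟩
      · exact absurd h' hml
      · right
        simp only [Finset.mem_Icc] at hi
        have hgap : pvGaps n weak = PySem.List.sorted gaps0 (fun x => x) true := rfl
        refine ⟨i - 1, ?_, ?_, ?_⟩
        · rw [hglen']; omega
        · rw [PySem.List.length_sorted]; omega
        · have e : i - 1 + 1 = i := by omega
          rw [e]
          rw [hgap] at hcond
          simpa [e] using hcond
  have h := loop_eq (PySem.List.sorted dist (fun x => x) true)
      (PySem.List.sorted gaps0 (fun x => x) true) 0 0 0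
      (PySem.List.sorted gaps0 (fun x => x) true).sum
      hside (by ring) (by simp)
  simpa using h
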